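-- pv_equiv track=rewrite | github.com/alihacks/advent-of-code | Python/21/solution.py | get_allergens
-- ===== SOURCE A (Python) =====
-- def get_allergens(input):
--     allergens = {}
--     i_set = set()
--     i_list = []
--     for item in input:
--         ings, conts = item
--         i_set |= set(ings)
--         i_list += ings
--         for allergen in conts:
--             if allergen not in allergens:
--                 allergens.update({allergen: set(ings)})
--             else:
--                 allergens[allergen] = allergens[allergen] & set(ings)
--     return allergens, i_set, i_list
-- ===== SOURCE B (Python) =====
-- def get_allergens(input):
--     # Pass 1: index each allergen to the list of ingredient sets it occurs with,
--     # while aggregating the overall ingredient set and ingredient list.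
--     buckets = {}
--     i_set = set()
--     i_list = []
--     for ings, conts in input:
--         s = set(ings)
--         i_set |= s
--         i_list.extend(ings)
--         for allergen in conts:
--             buckets.setdefault(allergen, []).append(s)
--     # Pass 2: reduce each allergen's collected sets by intersection.
--     allergens = {}
--     for name, sets in buckets.items():
--         acc = sets[0]
--         for s in sets[1:]:
--             acc = acc & s
--         allergens[name] = acc
--     return allergens, i_set, i_list
-- ===== Notes on version B (the rewrite author's own statement) =====
-- stated objective: alternative
-- what changed: A intersects each allergen's candidate set incrementally inside the input loop; B first builds an index mapping each allergen to the list of ingredient sets it occurs with (collect pass), then reduces each bucket by intersection in a separate pass.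
import Mathlib
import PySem

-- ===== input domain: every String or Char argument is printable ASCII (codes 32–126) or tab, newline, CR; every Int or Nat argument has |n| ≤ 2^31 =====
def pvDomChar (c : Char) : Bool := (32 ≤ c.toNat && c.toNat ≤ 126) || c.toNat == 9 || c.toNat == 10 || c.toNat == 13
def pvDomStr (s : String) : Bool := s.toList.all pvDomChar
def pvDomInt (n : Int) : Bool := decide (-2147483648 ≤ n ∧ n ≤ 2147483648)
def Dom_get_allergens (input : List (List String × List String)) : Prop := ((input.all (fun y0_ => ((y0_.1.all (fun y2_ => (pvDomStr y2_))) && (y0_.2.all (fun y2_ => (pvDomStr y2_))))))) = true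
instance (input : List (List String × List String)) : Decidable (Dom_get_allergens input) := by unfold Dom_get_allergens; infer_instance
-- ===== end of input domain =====

-- B replaces A's intersect-as-you-go fold with a collect pass (allergen → list of ingredient
-- sets) followed by a separate reduce-by-intersection pass; objective: alternative decomposition.


-- ===== PORT A =====
-- body of A's inner 'for allergen in conts' loop
-- ('allergens[allergen]' is a lookup of a key just checked present: ported as getD)
def aInner (ings : List String) (d : PySem.Dict String (PySem.Set String)) (allergen : String) :
    PySem.Dict String (PySem.Set String) :=
  if d.contains allergen = false then
    d.insert allergen (PySem.Set.ofList ings)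
  else
    d.insert allergen (PySem.Set.inter (d.getD allergen PySem.Set.empty) (PySem.Set.ofList ings))

-- body of A's outer 'for item in input' loop over the state (allergens, i_set, i_list)
def aStep (st : PySem.Dict String (PySem.Set String) × PySem.Set String × List String)
    (item : List String × List String) :
    PySem.Dict String (PySem.Set String) × PySem.Set String × List String :=
  let ings := item.1
  (item.2.foldl (aInner ings) st.1,
   PySem.Set.union st.2.1 (PySem.Set.ofList ings),
   st.2.2 ++ ings)

def get_allergens (input : List (List String × List String)) :
    (List (String × List String)) × List String × List String :=
  let st := input.foldl aStep (PySem.Dict.empty, PySem.Set.empty, [])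
  (st.1.items, st.2.1, st.2.2)

-- ===== PORT B =====
-- body of B's inner collect loop: buckets.setdefault(allergen, []).append(s)
def bInner (s : PySem.Set String) (d : PySem.Dict String (List (PySem.Set String))) (allergen : String) :
    PySem.Dict String (List (PySem.Set String)) :=
  d.modify allergen [] (fun l => l ++ [s])

-- body of B's pass-1 loop over the state (buckets, i_set, i_list)
def bStep (st : PySem.Dict String (List (PySem.Set String)) × PySem.Set String × List String)
    (item : List String × List String) :
    PySem.Dict String (List (PySem.Set String)) × PySem.Set String × List String :=
  let s := PySem.Set.ofList item.1
  (item.2.foldl (bInner s) st.1,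
   PySem.Set.union st.2.1 s,
   st.2.2 ++ item.1)

-- 'acc = sets[0]; for s in sets[1:]: acc = acc & s' — the [] case is unreachable in B
-- (every bucket holds at least one set; Python would raise IndexError there)
def interAll (sets : List (PySem.Set String)) : PySem.Set String :=
  match sets with
  | [] => PySem.Set.empty
  | s0 :: rest => rest.foldl PySem.Set.inter s0

def get_allergens_alt (input : List (List String × List String)) :
    (List (String × List String)) × List String × List String :=
  let st := input.foldl bStep (PySem.Dict.empty, PySem.Set.empty, [])
  let allergens := st.1.items.foldl
    (fun (d : PySem.Dict String (PySem.Set String)) p => d.insert p.1 (interAll p.2))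
    PySem.Dict.empty
  (allergens.items, st.2.1, st.2.2)

-- ===== PRECONDITION & SPEC =====
def Spec_get_allergens (input : List (List String × List String)) (out : (List (String × List String)) × List String × List String) : Prop := out = get_allergens_alt input
instance (input : List (List String × List String)) (out : (List (String × List String)) × List String × List String) : Decidable (Spec_get_allergens input out) := by unfold Spec_get_allergens; infer_instance

-- ===== CLAIM (what is proved, stated in full; the proofs are below) =====
def Claim_equal_get_allergens : Prop := ∀ (input : List (List String × List String)), Dom_get_allergens input → Spec_get_allergens input (get_allergens input)

-- ===== LEMMAS AND PROOFS =====

-- A's incremental dict is B's bucket dict with every bucket reduced by intersection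
def mapInter (d : PySem.Dict String (List (PySem.Set String))) : PySem.Dict String (PySem.Set String) :=
  PySem.Dict.mk (d.items.map (fun p => (p.1, interAll p.2)))

lemma contains_mapInter (d : PySem.Dict String (List (PySem.Set String))) (a : String) :
    (mapInter d).contains a = d.contains a := by
  simp [mapInter, PySem.Dict.contains, List.any_map, Function.comp_def]

lemma get?_mapInter (d : PySem.Dict String (List (PySem.Set String))) (a : String) :
    (mapInter d).get? a = (d.get? a).map interAll := by
  simp [mapInter, PySem.Dict.get?, List.find?_map, Function.comp_def, Option.map_map]

lemma interAll_append (v : List (PySem.Set String)) (s : PySem.Set String) (hv : v ≠ []) :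
    interAll (v ++ [s]) = PySem.Set.inter (interAll v) s := by
  cases v with
  | nil => exact absurd rfl hv
  | cons v0 vr => simp [interAll, List.foldl_append]

lemma step_one (d : PySem.Dict String (List (PySem.Set String)))
    (hne : ∀ p ∈ d.items, p.2 ≠ ([] : List (PySem.Set String)))
    (ings : List String) (a : String) :
    aInner ings (mapInter d) a = mapInter (bInner (PySem.Set.ofList ings) d a) := by
  by_cases hc : d.contains a = true
  · obtain ⟨v, hv⟩ : ∃ v, d.get? a = some v := by
      have := PySem.Dict.contains_eq_isSome_get? (d := d) (k := a)
      rw [hc] at this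
      exact Option.isSome_iff_exists.mp this.symm
    have hvne : v ≠ [] := by
      have hmem : (a, v) ∈ d.items := PySem.Dict.mem_items_of_get?_eq_some _ hv
      exact hne _ hmem
    have hgd : d.getD a [] = v := PySem.Dict.getD_of_get?_eq_some _ _ hv
    have hgm : (mapInter d).getD a PySem.Set.empty = interAll v := by
      simp [PySem.Dict.getD, get?_mapInter, hv, PySem.Set.empty]
    unfold aInner bInner
    rw [contains_mapInter, hc]
    simp only [Bool.true_eq_false, if_false]
    rw [hgm]
    unfold PySem.Dict.modify
    rw [hgd]
    unfold PySem.Dict.insert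
    rw [contains_mapInter, hc]
    simp only [if_true]
    unfold mapInter
    simp only [List.map_map]
    congr 1
    apply List.map_congr_left
    intro p hp
    by_cases hpa : p.1 == a
    · simp [Function.comp, hpa, interAll_append v (PySem.Set.ofList ings) hvne]
    · simp [Function.comp, hpa]
  · have hc' : d.contains a = false := by simpa using hc
    have hgd : d.getD a [] = [] := PySem.Dict.getD_of_not_contains _ _ hc'
    unfold aInner bInner
    rw [contains_mapInter, hc']
    simp only [if_true]
    unfold PySem.Dict.modify
    rw [hgd]
    unfold PySem.Dict.insert
    rw [contains_mapInter, hc']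
    simp [mapInter, interAll]

lemma hne_bInner (d : PySem.Dict String (List (PySem.Set String)))
    (hne : ∀ p ∈ d.items, p.2 ≠ ([] : List (PySem.Set String)))
    (s : PySem.Set String) (a : String) :
    ∀ p ∈ (bInner s d a).items, p.2 ≠ ([] : List (PySem.Set String)) := by
  intro p hp
  unfold bInner PySem.Dict.modify PySem.Dict.insert at hp
  split at hp
  · simp only [List.mem_map] at hp
    obtain ⟨q, hq, hpq⟩ := hp
    by_cases hqa : q.1 == a
    · subst hpq; simp [hqa]
    · subst hpq; simp only [hqa, Bool.false_eq_true, if_false]; exact hne q hq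
  · simp only [List.mem_append, List.mem_singleton] at hp
    rcases hp with hp | hp
    · exact hne p hp
    · subst hp; simp
  
lemma nodup_bInner (d : PySem.Dict String (List (PySem.Set String)))
    (hnd : d.keys.Nodup) (s : PySem.Set String) (a : String) :
    (bInner s d a).keys.Nodup := by
  unfold bInner PySem.Dict.modify
  exact PySem.Dict.nodup_keys_insert _ _ _ hnd

lemma loop_eq (conts : List String) (ings : List String)
    (d : PySem.Dict String (List (PySem.Set String)))
    (hne : ∀ p ∈ d.items, p.2 ≠ ([] : List (PySem.Set String))) (hnd : d.keys.Nodup) :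
    conts.foldl (aInner ings) (mapInter d) = mapInter (conts.foldl (bInner (PySem.Set.ofList ings)) d)
    ∧ (∀ p ∈ (conts.foldl (bInner (PySem.Set.ofList ings)) d).items, p.2 ≠ ([] : List (PySem.Set String)))
    ∧ (conts.foldl (bInner (PySem.Set.ofList ings)) d).keys.Nodup := by
  induction conts generalizing d with
  | nil => exact ⟨rfl, hne, hnd⟩
  | cons c cs ih =>
    simp only [List.foldl_cons]
    rw [step_one d hne ings c]
    exact ih _ (hne_bInner d hne _ c) (nodup_bInner d hnd _ c)

lemma outer_eq (input : List (List String × List String))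
    (b : PySem.Dict String (List (PySem.Set String))) (x : PySem.Set String) (y : List String)
    (hne : ∀ p ∈ b.items, p.2 ≠ ([] : List (PySem.Set String))) (hnd : b.keys.Nodup) :
    input.foldl aStep (mapInter b, x, y)
      = (mapInter (input.foldl bStep (b, x, y)).1, (input.foldl bStep (b, x, y)).2)
    ∧ (∀ p ∈ (input.foldl bStep (b, x, y)).1.items, p.2 ≠ ([] : List (PySem.Set String)))
    ∧ (input.foldl bStep (b, x, y)).1.keys.Nodup := by
  induction input generalizing b x y with
  | nil => exact ⟨rfl, hne, hnd⟩
  | cons it its ih =>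
    simp only [List.foldl_cons]
    obtain ⟨h1, h2, h3⟩ := loop_eq it.2 it.1 b hne hnd
    have hstep : aStep (mapInter b, x, y) it
        = (mapInter (bStep (b, x, y) it).1, (bStep (b, x, y) it).2) := by
      unfold aStep bStep
      simp only
      rw [h1]
    rw [hstep]
    exact ih _ _ _ h2 h3

lemma empty_hne : ∀ p ∈ (PySem.Dict.empty : PySem.Dict String (List (PySem.Set String))).items,
    p.2 ≠ ([] : List (PySem.Set String)) := by
  intro p hp
  simp [PySem.Dict.empty] at hp

-- ===== VERDICT (by name: the statement is the Claim_ definition above) =====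
theorem get_allergens_spec : Claim_equal_get_allergens := by
  intro input _
  unfold Spec_get_allergens get_allergens get_allergens_alt
  obtain ⟨h1, h2, h3⟩ := outer_eq input PySem.Dict.empty PySem.Set.empty [] empty_hne
    (by simp [PySem.Dict.keys, PySem.Dict.empty])
  set B := (input.foldl bStep (PySem.Dict.empty, PySem.Set.empty, [])).1 with hB
  have hempty : (mapInter PySem.Dict.empty : PySem.Dict String (PySem.Set String))
      = PySem.Dict.empty := by
    simp [mapInter, PySem.Dict.empty]
  rw [hempty] at h1
  have hfresh := PySem.Dict.items_foldl_insert_fresh (l := B.items)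
    (k := Prod.fst) (v := fun p => interAll p.2) (d := (PySem.Dict.empty : PySem.Dict String (PySem.Set String)))
    (by intro a _; exact PySem.Dict.contains_empty _)
    (by simpa [PySem.Dict.keys] using h3)
  have hfresh' : (B.items.foldl
      (fun (d : PySem.Dict String (PySem.Set String)) p => d.insert p.1 (interAll p.2))
      PySem.Dict.empty).items = B.items.map (fun p => (p.1, interAll p.2)) := by
    simpa [PySem.Dict.empty] using hfresh
  simp only
  rw [h1, hfresh']
  simp [mapInter]
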